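-- pv_equiv track=rewrite | github.com/grir/bioalgorithms | p2-5.py | isConsistent
-- ===== SOURCE A (Python) =====
-- def counter(lst):
--     c1 = {}
--     for m in lst:
--       c1[ m ] = 0
--
--     for m in lst:
--       c1[ m ] = c1[ m ] + 1
--
--     return c1
--
-- def getLinearSpectrum(massList):
--     spc = list(massList)
--     ll = len(massList)
--     for k in range(1,ll):
--       for pos in range(0, ll - k):
--           s = sum(massList[pos:pos+k+1])
--           spc.append(s)
--     spc.sort()
--     return spc
--
-- def isConsistent(massList, spectrumCounter):
--     if len(massList) > len(spectrumCounter.keys()):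
--        return False
--
--     massListSpectrum = getLinearSpectrum(massList)
--
--     c1 = counter(massListSpectrum)
--     for m in massListSpectrum:
--        if m not in spectrumCounter.keys():
--           return False
--        elif c1[ m ] > spectrumCounter[ m ] :
--           return False
--
--     return True
-- ===== SOURCE B (Python) =====
-- def isConsistent(massList, spectrumCounter):
--     if len(massList) > len(spectrumCounter.keys()):
--         return False
--     prefix = [0]
--     for m in massList:
--         prefix.append(prefix[-1] + m)
--     n = len(massList)
--     counts = {}
--     for length in range(1, n + 1):
--         for i in range(n - length + 1):
--             s = prefix[i + length] - prefix[i]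
--             counts[s] = counts.get(s, 0) + 1
--     for m, c in counts.items():
--         if m not in spectrumCounter or c > spectrumCounter[m]:
--             return False
--     return True
-- ===== Notes on version B (the rewrite author's own statement) =====
-- stated objective: alternative
-- what changed: B replaces A's slice-by-slice re-summing (O(n^3) in the peptide length) plus a sort with prefix sums giving each subpeptide mass in O(1), and checks a counting dict once per distinct mass without sorting.
import Mathlib
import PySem

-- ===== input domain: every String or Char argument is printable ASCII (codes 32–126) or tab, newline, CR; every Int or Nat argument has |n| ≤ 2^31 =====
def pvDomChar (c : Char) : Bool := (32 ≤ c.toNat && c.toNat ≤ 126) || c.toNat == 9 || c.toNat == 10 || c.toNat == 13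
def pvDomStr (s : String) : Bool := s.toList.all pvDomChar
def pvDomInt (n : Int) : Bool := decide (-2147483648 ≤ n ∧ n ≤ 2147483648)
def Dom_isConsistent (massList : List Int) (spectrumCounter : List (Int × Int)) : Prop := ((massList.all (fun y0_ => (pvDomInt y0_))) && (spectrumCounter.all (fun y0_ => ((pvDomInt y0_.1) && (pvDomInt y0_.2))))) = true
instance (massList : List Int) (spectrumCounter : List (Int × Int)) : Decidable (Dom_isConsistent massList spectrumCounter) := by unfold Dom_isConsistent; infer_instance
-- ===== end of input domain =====

-- B replaces A's slice-by-slice re-summing plus sort with prefix sums and a single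
-- counting dict checked once per distinct mass (objective: alternative).

-- ===== PORT A =====
def counterA (lst : List Int) : PySem.Dict Int Int :=
  let c1 := lst.foldl (fun d m => d.insert m 0) PySem.Dict.empty
  lst.foldl (fun d m => d.insert m (d.getD m 0 + 1)) c1

def getLinearSpectrumA (massList : List Int) : List Int :=
  let ll : Int := massList.length
  let spc := (PySem.List.pyRange 1 ll 1).foldl (fun spc k =>
    (PySem.List.pyRange 0 (ll - k) 1).foldl (fun spc pos =>
      spc ++ [(PySem.List.slice massList (some pos) (some (pos + k + 1))).sum]) spc) massList
  PySem.List.sorted spc (fun x => x) false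

def isConsistent (massList : List Int) (spectrumCounter : List (Int × Int)) : Bool :=
  let d := PySem.Dict.mk spectrumCounter
  if massList.length > d.keys.length then false
  else
    let massListSpectrum := getLinearSpectrumA massList
    let c1 := counterA massListSpectrum
    massListSpectrum.all (fun m =>
      if !(d.contains m) then false
      else if c1.getD m 0 > d.getD m 0 then false
      else true)

-- ===== PORT B =====
def isConsistent_alt (massList : List Int) (spectrumCounter : List (Int × Int)) : Bool :=
  let d := PySem.Dict.mk spectrumCounter
  if massList.length > d.keys.length then false
  else
    let pre := massList.foldl (fun p m => p ++ [PySem.List.pyGetD p (-1) 0 + m]) [(0 : Int)]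
    let n : Int := massList.length
    let counts := (PySem.List.pyRange 1 (n + 1) 1).foldl (fun c len =>
      (PySem.List.pyRange 0 (n - len + 1) 1).foldl (fun c i =>
        let s := PySem.List.pyGetD pre (i + len) 0 - PySem.List.pyGetD pre i 0
        c.insert s (c.getD s 0 + 1)) c) (PySem.Dict.empty : PySem.Dict Int Int)
    counts.items.all (fun p =>
      if !(d.contains p.1) || p.2 > d.getD p.1 0 then false else true)

-- ===== PRECONDITION & SPEC =====
def Spec_isConsistent (massList : List Int) (spectrumCounter : List (Int × Int)) (out : Bool) : Prop := out = isConsistent_alt massList spectrumCounter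
instance (massList : List Int) (spectrumCounter : List (Int × Int)) (out : Bool) : Decidable (Spec_isConsistent massList spectrumCounter out) := by unfold Spec_isConsistent; infer_instance

-- ===== CLAIM (what is proved, stated in full; the proofs are below) =====
def Claim_equal_isConsistent : Prop := ∀ (massList : List Int) (spectrumCounter : List (Int × Int)), Dom_isConsistent massList spectrumCounter → Spec_isConsistent massList spectrumCounter (isConsistent massList spectrumCounter)

-- ===== LEMMAS AND PROOFS =====

-- B's prefix list, and closed forms for the two unsorted spectra
def preOf (l : List Int) : List Int :=
  l.foldl (fun p m => p ++ [PySem.List.pyGetD p (-1) 0 + m]) [(0 : Int)]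

def rawA (l : List Int) : List Int :=
  l ++ (PySem.List.pyRange 1 (l.length : Int) 1).flatMap (fun k =>
    (PySem.List.pyRange 0 ((l.length : Int) - k) 1).map (fun pos =>
      (PySem.List.slice l (some pos) (some (pos + k + 1))).sum))

def listB (l : List Int) : List Int :=
  (PySem.List.pyRange 1 ((l.length : Int) + 1) 1).flatMap (fun len =>
    (PySem.List.pyRange 0 ((l.length : Int) - len + 1) 1).map (fun i =>
      PySem.List.pyGetD (preOf l) (i + len) 0 - PySem.List.pyGetD (preOf l) i 0))

theorem foldl_pre_aux (l p : List Int) (x : Int) :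
    l.foldl (fun p m => p ++ [PySem.List.pyGetD p (-1) 0 + m]) (p ++ [x]) =
      p ++ [x] ++ (List.range l.length).map (fun j => x + (l.take (j + 1)).sum) := by
  induction l generalizing p x with
  | nil => simp
  | cons m t ih =>
    simp only [List.foldl_cons, PySem.List.pyGetD_neg_one_append_singleton]
    rw [show p ++ [x] ++ [x + m] = (p ++ [x]) ++ [x + m] by simp, ih]
    simp [List.range_succ_eq_map, Function.comp_def, List.map_map, add_assoc]

theorem preOf_eq (l : List Int) :
    preOf l = (List.range (l.length + 1)).map (fun j => (l.take j).sum) := by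
  have h := foldl_pre_aux l [] 0
  simp only [List.nil_append] at h
  rw [preOf, h]
  simp [List.range_succ_eq_map, Function.comp_def, List.map_map]

theorem pre_getD (l : List Int) (j : Int) (h0 : 0 ≤ j) (h1 : j ≤ (l.length : Int)) :
    PySem.List.pyGetD (preOf l) j 0 = (l.take j.toNat).sum := by
  rw [preOf_eq, PySem.List.pyGetD_of_nonneg _ _ h0]
  have hj : j.toNat < l.length + 1 := by omega
  rw [List.getD_eq_getElem _ _ (by simpa using hj)]
  simp

theorem slice_sum (l : List Int) (a b : Int) (h0 : 0 ≤ a) (hab : a ≤ b) :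
    (PySem.List.slice l (some a) (some b)).sum = (l.take b.toNat).sum - (l.take a.toNat).sum := by
  rw [PySem.List.slice_toNat l h0 (le_trans h0 hab)]
  have h2 : (l.take b.toNat).sum
      = (l.take a.toNat).sum + ((l.drop a.toNat).take (b.toNat - a.toNat)).sum := by
    rw [← List.sum_append, ← List.take_add, show a.toNat + (b.toNat - a.toNat) = b.toNat by omega]
  rw [h2]
  ring

theorem getD_insert_zero_not_mem (lst : List Int) (d : PySem.Dict Int Int) (m : Int) (hm : m ∉ lst) :
    (lst.foldl (fun d m => d.insert m 0) d).getD m 0 = d.getD m 0 := by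
  induction lst generalizing d with
  | nil => rfl
  | cons a t ih =>
    simp only [List.foldl_cons]
    simp only [List.mem_cons, not_or] at hm
    rw [ih _ hm.2]
    exact PySem.Dict.getD_insert_of_ne d 0 0 hm.1

theorem getD_insert_zero (lst : List Int) (d : PySem.Dict Int Int) (m : Int) (hm : m ∈ lst) :
    (lst.foldl (fun d m => d.insert m 0) d).getD m 0 = 0 := by
  induction lst generalizing d with
  | nil => simp at hm
  | cons a t ih =>
    simp only [List.foldl_cons]
    by_cases ht : m ∈ t
    · exact ih _ ht
    · have ha : m = a := by simp only [List.mem_cons] at hm; tauto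
      subst ha
      rw [getD_insert_zero_not_mem t _ m ht]
      simp [PySem.Dict.getD_insert_self]

theorem counterA_getD (lst : List Int) (m : Int) (hm : m ∈ lst) :
    (counterA lst).getD m 0 = (lst.count m : Int) := by
  unfold counterA
  rw [PySem.Dict.getD_foldl_insert_add_one, getD_insert_zero _ _ _ hm]
  simp

theorem foldl_foldl_flatMap {α β γ : Type} (xs : List α) (f : α → List β) (g : γ → β → γ) (init : γ) :
    xs.foldl (fun a x => (f x).foldl g a) init = (xs.flatMap f).foldl g init := by
  induction xs generalizing init with
  | nil => rfl
  | cons x t ih => simp [List.foldl_append, ih]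

theorem flatMap_congr_mem {α β : Type} (l : List α) (f g : α → List β)
    (h : ∀ x ∈ l, f x = g x) : l.flatMap f = l.flatMap g := by
  induction l with
  | nil => rfl
  | cons a t ih =>
    simp only [List.flatMap_cons]
    rw [h a (by simp), ih (fun x hx => h x (by simp [hx]))]

-- A's spectrum is the sorted version of rawA
theorem portA_spectrum (l : List Int) :
    getLinearSpectrumA l = PySem.List.sorted (rawA l) (fun x => x) false := by
  unfold getLinearSpectrumA rawA
  simp only [PySem.List.foldl_append_singleton_eq_map, PySem.List.foldl_append_eq_flatMap]

-- B's counting loop builds Counter(listB)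
theorem portB_counts (l : List Int) :
    (PySem.List.pyRange 1 ((l.length : Int) + 1) 1).foldl (fun c len =>
      (PySem.List.pyRange 0 ((l.length : Int) - len + 1) 1).foldl (fun c i =>
        c.insert (PySem.List.pyGetD (preOf l) (i + len) 0 - PySem.List.pyGetD (preOf l) i 0)
          (c.getD (PySem.List.pyGetD (preOf l) (i + len) 0 - PySem.List.pyGetD (preOf l) i 0) 0 + 1)) c)
      (PySem.Dict.empty : PySem.Dict Int Int)
      = PySem.Dict.counter (listB l) := by
  have hbody : (fun (c : PySem.Dict Int Int) (len : Int) =>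
      (PySem.List.pyRange 0 ((l.length : Int) - len + 1) 1).foldl (fun c i =>
        c.insert (PySem.List.pyGetD (preOf l) (i + len) 0 - PySem.List.pyGetD (preOf l) i 0)
          (c.getD (PySem.List.pyGetD (preOf l) (i + len) 0 - PySem.List.pyGetD (preOf l) i 0) 0 + 1)) c)
      = (fun (c : PySem.Dict Int Int) (len : Int) =>
        ((PySem.List.pyRange 0 ((l.length : Int) - len + 1) 1).map (fun i =>
          PySem.List.pyGetD (preOf l) (i + len) 0 - PySem.List.pyGetD (preOf l) i 0)).foldl
          (fun c s => c.insert s (c.getD s 0 + 1)) c) := by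
    funext c len
    rw [List.foldl_map]
  rw [hbody, foldl_foldl_flatMap, PySem.Dict.foldl_insert_getD_add_one_eq_counter]
  rfl

-- the multiset A sums slice-by-slice is, group by group, B's prefix-difference list
theorem spectra_eq (l : List Int) : rawA l = listB l := by
  by_cases hl : l = []
  · subst hl
    simp [rawA, listB, PySem.List.pyRange_one]
  · have hpos : 0 < l.length := List.length_pos_of_ne_nil hl
    have hn : 1 ≤ (l.length : Int) := by omega
    set n : Int := (l.length : Int) with hn_def
    rw [listB, PySem.List.pyRange_one_append 1 2 (n + 1) (by omega) (by omega),
      show (2 : Int) = 1 + 1 by norm_num, PySem.List.pyRange_one_singleton,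
      List.flatMap_append, List.flatMap_cons, List.flatMap_nil, List.append_nil]
    rw [rawA]
    congr 1
    -- first group: the length-1 sums are massList itself
    · have : (PySem.List.pyRange 0 (n - 1 + 1) 1).map (fun i =>
          PySem.List.pyGetD (preOf l) (i + 1) 0 - PySem.List.pyGetD (preOf l) i 0) = l := by
        rw [show n - 1 + 1 = n by ring]
        have hcg : ∀ i ∈ PySem.List.pyRange 0 n 1,
            PySem.List.pyGetD (preOf l) (i + 1) 0 - PySem.List.pyGetD (preOf l) i 0
              = PySem.List.pyGetD l i 0 := by
          intro i hi
          rw [PySem.List.mem_pyRange_one] at hi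
          rw [pre_getD l (i + 1) (by omega) (by omega), pre_getD l i (by omega) (by omega)]
          have hlt : i.toNat < l.length := by omega
          rw [show (i + 1).toNat = i.toNat + 1 by omega, List.sum_take_succ _ _ hlt,
            PySem.List.pyGetD_of_nonneg _ _ hi.1, List.getD_eq_getElem _ _ hlt]
          ring
        rw [List.map_congr_left hcg]
        have := PySem.List.map_pyGetD_pyRange_zero l 0
        simpa using this
      exact this.symm
    -- remaining groups: length k+1 slices vs prefix differences
    · rw [show (1 : Int) + 1 = 2 by norm_num, PySem.List.pyRange_one 2 (n + 1),
        PySem.List.pyRange_one 1 n, List.flatMap_map, List.flatMap_map]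
      rw [show (n + 1 - 2).toNat = (n - 1).toNat by congr 1; ring]
      apply flatMap_congr_mem
      intro k hk
      rw [List.mem_range] at hk
      have hkn : (k : Int) < n - 1 := by omega
      rw [show n - (2 + (k : Int)) + 1 = n - (1 + (k : Int)) by ring]
      apply List.map_congr_left
      intro pos hp
      rw [PySem.List.mem_pyRange_one] at hp
      rw [slice_sum l pos (pos + (1 + (k : Int)) + 1) hp.1 (by omega),
        pre_getD l (pos + (2 + (k : Int))) (by omega) (by omega),
        pre_getD l pos (by omega) (by omega)]
      rw [show (pos + (1 + (k : Int)) + 1).toNat = (pos + (2 + (k : Int))).toNat by omega]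

theorem predA_iff (c : Bool) (x y : Int) :
    ((if !c then false else if x > y then false else true) = true) ↔ (c = true ∧ ¬ x > y) := by
  cases c <;> simp

theorem predB_iff (c : Bool) (x y : Int) :
    ((if !c || x > y then false else true) = true) ↔ (c = true ∧ ¬ x > y) := by
  cases c <;> simp

theorem all_eq (l : List Int) (d : PySem.Dict Int Int) :
    (PySem.List.sorted (rawA l) (fun x => x) false).all (fun m =>
      if !(d.contains m) then false
      else if (counterA (PySem.List.sorted (rawA l) (fun x => x) false)).getD m 0 > d.getD m 0 then false
      else true)
    = (PySem.Dict.counter (listB l)).items.all (fun p =>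
      if !(d.contains p.1) || p.2 > d.getD p.1 0 then false else true) := by
  have hperm : (PySem.List.sorted (rawA l) (fun x => x) false).Perm (rawA l) :=
    PySem.List.sorted_perm _ _ _
  rw [Bool.eq_iff_iff]
  simp only [List.all_eq_true, PySem.Dict.items_counter, List.forall_mem_map]
  constructor
  · intro h k hk
    rw [PySem.Set.mem_ofList, ← spectra_eq] at hk
    have hkS : k ∈ PySem.List.sorted (rawA l) (fun x => x) false := by
      rw [PySem.List.mem_sorted]; exact hk
    have := (predA_iff _ _ _).mp (h k hkS)
    rw [counterA_getD _ _ hkS, hperm.count_eq, spectra_eq] at this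
    exact (predB_iff _ _ _).mpr this
  · intro h m hm
    have hmraw : m ∈ rawA l := by rwa [PySem.List.mem_sorted] at hm
    have hmB : m ∈ PySem.Set.ofList (listB l) := by
      rw [PySem.Set.mem_ofList, ← spectra_eq]; exact hmraw
    have := (predB_iff _ _ _).mp (h m hmB)
    apply (predA_iff _ _ _).mpr
    rwa [counterA_getD _ _ hm, hperm.count_eq, spectra_eq]

theorem branch_eq (l : List Int) (d : PySem.Dict Int Int) :
    (PySem.List.sorted (rawA l) (fun x => x) false).all (fun m =>
      if !(d.contains m) then false
      else if (counterA (PySem.List.sorted (rawA l) (fun x => x) false)).getD m 0 > d.getD m 0 then false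
      else true)
    = ((PySem.List.pyRange 1 ((l.length : Int) + 1) 1).foldl (fun c len =>
      (PySem.List.pyRange 0 ((l.length : Int) - len + 1) 1).foldl (fun c i =>
        c.insert (PySem.List.pyGetD (preOf l) (i + len) 0 - PySem.List.pyGetD (preOf l) i 0)
          (c.getD (PySem.List.pyGetD (preOf l) (i + len) 0 - PySem.List.pyGetD (preOf l) i 0) 0 + 1)) c)
      (PySem.Dict.empty : PySem.Dict Int Int)).items.all (fun p =>
      if !(d.contains p.1) || p.2 > d.getD p.1 0 then false else true) := by
  rw [portB_counts]
  exact all_eq l d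

-- ===== VERDICT (by name: the statement is the Claim_ definition above) =====
theorem isConsistent_spec : Claim_equal_isConsistent := by
  intro massList spectrumCounter _
  unfold Spec_isConsistent isConsistent isConsistent_alt
  by_cases hg : massList.length > (PySem.Dict.mk spectrumCounter).keys.length
  · simp only [if_pos hg]
  · simp only [if_neg hg]
    rw [portA_spectrum]
    exact branch_eq massList (PySem.Dict.mk spectrumCounter)
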